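-- pv_equiv track=rewrite | github.com/ddorn/bash-assistant | src/utils.py | fmt_diff
-- ===== SOURCE A (Python) =====
-- from typing import Generator, Iterator
--
-- def fmt(
--     text: str,
--     fg: int | tuple[int, int, int] = None,
--     bg: int | tuple[int, int, int] = None,
--     underline: bool = False,
-- ) -> str:
--     """Format the text with the given colors."""
--
--     mods = ""
--
--     if underline:
--         mods += "\033[4m"
--
--     if fg is not None:
--         if isinstance(fg, int):
--             mods += f"\033[38;5;{fg}m"
--         else:
--             mods += f"\033[38;2;{fg[0]};{fg[1]};{fg[2]}m"
--
--     if bg is not None: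
--         if isinstance(bg, int):
--             mods += f"\033[48;5;{bg}m"
--         else:
--             mods += f"\033[48;2;{bg[0]};{bg[1]};{bg[2]}m"
--
--     if mods:
--         text = mods + text + "\033[0m"
--
--     return text
--
-- def fmt_diff(diff: Iterator[str]) -> tuple[str, str]:
--     """Format the output of difflib.ndiff.
--
--     Returns:
--         tuple[str, str]: The two strings (past, new) with the differences highlighted in ANSI colors.
--     """
--
--     past = ""
--     new = ""
--     for line in diff:
--         mark = line[0]
--         line = line[2:]
--         match mark:
--             case " ":
--                 past += line
--                 new += line
--             case "-":
--                 past += fmt(line, fg=1, underline=True)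
--             case "+":
--                 new += fmt(line, fg=2, underline=True)
--             case "?":
--                 pass
--
--     return past, new
-- ===== SOURCE B (Python) =====
-- def fmt_diff(diff):
--     """Format the output of difflib.ndiff.
--
--     Two independent filtered joins over a snapshot of the iterator,
--     with the ANSI wrapping inlined, instead of one stateful loop.
--     """
--     lines = list(diff)
--     past = "".join(
--         line[2:] if line[:1] == " " else "\033[4m\033[38;5;1m" + line[2:] + "\033[0m"
--         for line in lines
--         if line[:1] in (" ", "-")
--     )
--     new = "".join(
--         line[2:] if line[:1] == " " else "\033[4m\033[38;5;2m" + line[2:] + "\033[0m"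
--         for line in lines
--         if line[:1] in (" ", "+")
--     )
--     return past, new
-- ===== Notes on version B (the rewrite author's own statement) =====
-- stated objective: alternative
-- what changed: Replaces A's single stateful loop that dispatches on line[0] and appends to two accumulators with two independent filtered joins over a snapshot of the iterator (past over ' '/'-' lines, new over ' '/'+' lines), with the ANSI wrapping inlined instead of calling fmt.
import Mathlib
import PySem

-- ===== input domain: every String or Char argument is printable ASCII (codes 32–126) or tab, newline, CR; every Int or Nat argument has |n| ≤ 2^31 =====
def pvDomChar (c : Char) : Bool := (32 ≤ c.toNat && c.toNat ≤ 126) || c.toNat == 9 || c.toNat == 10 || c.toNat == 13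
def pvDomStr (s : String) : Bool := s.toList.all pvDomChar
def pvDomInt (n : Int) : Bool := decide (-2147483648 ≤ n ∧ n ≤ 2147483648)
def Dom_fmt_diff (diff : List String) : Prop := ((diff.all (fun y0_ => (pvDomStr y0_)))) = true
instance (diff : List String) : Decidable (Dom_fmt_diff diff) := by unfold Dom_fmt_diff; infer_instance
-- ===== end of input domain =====

-- B replaces A's single stateful loop by two independent filtered joins (past over ' '/'-' lines,
-- new over ' '/'+' lines) with the ANSI wrapping inlined; same return value wherever A returns.

-- ===== PORT A =====
-- Transliteration of the module helper `fmt` as A calls it (fg : Option Int, bg always None).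
def fmtA (text : String) (fg : Option Int) (underline : Bool) : String :=
  let mods : String := if underline then "\x1b[4m" else ""
  let mods : String :=
    match fg with
    | none => mods
    | some n => mods ++ "\x1b[38;5;" ++ PySem.Int.toStr n ++ "m"
  if mods = "" then text else mods ++ text ++ "\x1b[0m"

-- `line[0]` raises IndexError on an empty line (excluded by Pre_); the `none` branch is unreachable there.
def fmt_diff (diff : List String) : String × String :=
  diff.foldl (fun st line =>
    match PySem.Str.pyGet? line 0 with
    | none => st
    | some mark =>
      let line2 := PySem.Str.slice line (some 2) none
      if mark = ' ' then (st.1 ++ line2, st.2 ++ line2)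
      else if mark = '-' then (st.1 ++ fmtA line2 (some 1) true, st.2)
      else if mark = '+' then (st.1, st.2 ++ fmtA line2 (some 2) true)
      else st) ("", "")

-- ===== PORT B =====
def fmt_diff_alt (diff : List String) : String × String :=
  let lines := diff
  let past := PySem.Str.join ""
    ((lines.filter (fun l =>
        PySem.Str.slice l none (some 1) == " " || PySem.Str.slice l none (some 1) == "-")).map
      (fun l =>
        if PySem.Str.slice l none (some 1) = " " then PySem.Str.slice l (some 2) none
        else "\x1b[4m\x1b[38;5;1m" ++ PySem.Str.slice l (some 2) none ++ "\x1b[0m"))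
  let new := PySem.Str.join ""
    ((lines.filter (fun l =>
        PySem.Str.slice l none (some 1) == " " || PySem.Str.slice l none (some 1) == "+")).map
      (fun l =>
        if PySem.Str.slice l none (some 1) = " " then PySem.Str.slice l (some 2) none
        else "\x1b[4m\x1b[38;5;2m" ++ PySem.Str.slice l (some 2) none ++ "\x1b[0m"))
  (past, new)

-- ===== PRECONDITION & SPEC =====
-- Pre_ excludes diffs containing an empty string: there A's `line[0]` raises IndexError.
def Pre_fmt_diff (diff : List String) : Prop := "" ∉ diff
instance (diff : List String) : Decidable (Pre_fmt_diff diff) := by unfold Pre_fmt_diff; infer_instance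
def pvWitness_fmt_diff : List String := ["- abc", "+ abd", "?   ^", "  same"]

def Spec_fmt_diff (diff : List String) (out : String × String) : Prop := out = fmt_diff_alt diff
instance (diff : List String) (out : String × String) : Decidable (Spec_fmt_diff diff out) := by unfold Spec_fmt_diff; infer_instance

-- ===== CLAIM (what is proved, stated in full; the proofs are below) =====
def Claim_equal_fmt_diff : Prop := ∀ (diff : List String), Dom_fmt_diff diff → Pre_fmt_diff diff → Spec_fmt_diff diff (fmt_diff diff)

-- ===== LEMMAS AND PROOFS =====

lemma chars_join_nil_cons (x : List Char) (xs : List (List Char)) :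
    PySem.Chars.join [] (x :: xs) = x ++ PySem.Chars.join [] xs := by
  cases xs <;> simp [PySem.Chars.join_nil, PySem.Chars.join_singleton, PySem.Chars.join_cons_cons]

lemma loop_lemma (diff : List String) (h : ∀ l ∈ diff, l ≠ "") (p n : String) :
    diff.foldl (fun st line =>
      match PySem.Str.pyGet? line 0 with
      | none => st
      | some mark =>
        let line2 := PySem.Str.slice line (some 2) none
        if mark = ' ' then (st.1 ++ line2, st.2 ++ line2)
        else if mark = '-' then (st.1 ++ fmtA line2 (some 1) true, st.2)
        else if mark = '+' then (st.1, st.2 ++ fmtA line2 (some 2) true)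
        else st) (p, n)
    = (p ++ (fmt_diff_alt diff).1, n ++ (fmt_diff_alt diff).2) := by
  induction diff generalizing p n with
  | nil => simp [fmt_diff_alt, PySem.Str.join, PySem.Chars.join_nil]
  | cons line rest ih =>
    have hne : line ≠ "" := h line (by simp)
    have hrest : ∀ l ∈ rest, l ≠ "" := fun l hl => h l (by simp [hl])
    obtain ⟨c, cs, hl⟩ : ∃ c cs, line.toList = c :: cs := by
      cases hcl : line.toList with
      | nil => exact absurd (String.toList_inj.mp (by simp [hcl])) hne
      | cons c cs => exact ⟨c, cs, rfl⟩
    have hget : PySem.Str.pyGet? line 0 = some c := by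
      simp [PySem.Str.pyGet?, hl]
    have hslice1 : PySem.Str.slice line none (some 1) = String.ofList [c] := by
      apply String.toList_inj.mp
      simp [PySem.Str.slice, hl, PySem.Chars.slice, PySem.List.slice_to]
    have hfmt1 : ∀ r : String, fmtA r (some 1) true = "\x1b[4m\x1b[38;5;1m" ++ r ++ "\x1b[0m" := by
      intro r; apply String.toList_inj.mp
      simp [fmtA, PySem.Int.toStr, show PySem.Int.toChars 1 = ['1'] from by decide]
    have hfmt2 : ∀ r : String, fmtA r (some 2) true = "\x1b[4m\x1b[38;5;2m" ++ r ++ "\x1b[0m" := by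
      intro r; apply String.toList_inj.mp
      simp [fmtA, PySem.Int.toStr, show PySem.Int.toChars 2 = ['2'] from by decide]
    have closer : ∀ x y : String × String, x.1.toList = y.1.toList → x.2.toList = y.2.toList → x = y :=
      fun x y h1 h2 => Prod.ext (String.toList_inj.mp h1) (String.toList_inj.mp h2)
    simp only [List.foldl_cons, hget, ih hrest]
    rcases Decidable.em (c = ' ') with h1 | h1
    · subst h1
      apply closer <;>
        simp [fmt_diff_alt, hslice1, chars_join_nil_cons,
          show (String.ofList [' '] == ("-" : String)) = false from by decide,
          show (String.ofList [' '] == ("+" : String)) = false from by decide]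
    · rcases Decidable.em (c = '-') with h2 | h2
      · subst h2
        apply closer <;>
          simp [fmt_diff_alt, hslice1, chars_join_nil_cons, hfmt1, h1,
            show (String.ofList ['-'] == (" " : String)) = false from by decide,
            show (String.ofList ['-'] == ("+" : String)) = false from by decide,
            show ((String.ofList ['-'] : String) = " ") = False from by simp]
      · rcases Decidable.em (c = '+') with h3 | h3
        · subst h3
          apply closer <;>
            simp [fmt_diff_alt, hslice1, chars_join_nil_cons, hfmt2, h1, h2,
              show (String.ofList ['+'] == (" " : String)) = false from by decide,
              show (String.ofList ['+'] == ("-" : String)) = false from by decide,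
              show ((String.ofList ['+'] : String) = " ") = False from by simp]
        · have hA : (String.ofList [c] == (" " : String)) = false := by
            simp; intro he; exact h1 (by simpa using congrArg String.toList he)
          have hB : (String.ofList [c] == ("-" : String)) = false := by
            simp; intro he; exact h2 (by simpa using congrArg String.toList he)
          have hC : (String.ofList [c] == ("+" : String)) = false := by
            simp; intro he; exact h3 (by simpa using congrArg String.toList he)
          simp [fmt_diff_alt, hslice1, h1, h2, h3, hA, hB, hC]

-- ===== VERDICT (by name: the statement is the Claim_ definition above) =====
theorem fmt_diff_spec : Claim_equal_fmt_diff := by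
  intro diff _ hpre
  have h : ∀ l ∈ diff, l ≠ "" := fun l hl he => hpre (he ▸ hl)
  show fmt_diff diff = fmt_diff_alt diff
  have := loop_lemma diff h "" ""
  unfold fmt_diff
  rw [this]
  apply Prod.ext <;> (apply String.toList_inj.mp; simp)
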